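-- pv_equiv track=rewrite | github.com/mfuellbier/Warriors-and-Gatherers | functions.py | shortString
-- ===== SOURCE A (Python) =====
-- def shortString(string):
--     # Input: string/with/slashes/and/maybe/dot/with.suffix
--     # Output: with
--     k = 0
--     char = ""
--     while k<len(string) and char != "." and char != "/":
--         char = string[::-1][k]
--         k+=1
--     # char == "/" or "."
--
--     newString = string
--     if char == ".":
--         # remove ".suffix"
--         newString = string[:-k]
--     elif char == "/":
--         # remove "string/with/slashes/and/maybe/dot/"
--         newString = string[len(string)-k+1:]
--
--     # repeat as often as necessary
--     if newString != string:
--         newString = shortString(newString)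
--     return newString
-- ===== SOURCE B (Python) =====
-- def shortString(string):
--     # Single forward pass: a '/' restarts the accumulator, a '.' freezes it,
--     # any other char is appended while not frozen.
--     acc = ""
--     seen_dot = False
--     for ch in string:
--         if ch == '/':
--             acc, seen_dot = "", False
--         elif ch == '.':
--             seen_dot = True
--         elif not seen_dot:
--             acc += ch
--     return acc
-- ===== Notes on version B (the rewrite author's own statement) =====
-- stated objective: faster
-- what changed: A repeatedly reverse-scans for the last dot or slash and recursively re-strips the shrinking string; B makes one forward pass over the characters with an accumulator that a slash resets and a dot freezes.
import Mathlib
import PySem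

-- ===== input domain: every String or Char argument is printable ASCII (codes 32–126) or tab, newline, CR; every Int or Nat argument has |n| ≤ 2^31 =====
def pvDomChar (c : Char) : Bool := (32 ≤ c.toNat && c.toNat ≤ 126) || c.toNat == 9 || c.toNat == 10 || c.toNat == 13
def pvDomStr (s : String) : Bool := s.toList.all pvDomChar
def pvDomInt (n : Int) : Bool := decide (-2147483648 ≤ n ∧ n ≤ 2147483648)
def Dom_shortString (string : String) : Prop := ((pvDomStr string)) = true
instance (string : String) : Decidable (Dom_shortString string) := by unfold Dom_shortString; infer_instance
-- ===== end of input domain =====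

-- B replaces A's repeated reverse-scan-and-strip recursion by one forward fold over the
-- characters (objective: simpler, one pass); both return basename-before-first-dot.

-- ===== PORT A =====
-- Termination helpers for the port's slices (cited by the port's decreasing_by).
theorem pvTake_ne_lt (xs : List Char) (m : Nat) (h : xs.take m ≠ xs) : (xs.take m).length < xs.length := by
  rcases Nat.lt_or_ge m xs.length with hm | hm
  · simpa [List.length_take] using hm
  · exact absurd (List.take_of_length_le hm) h

theorem pvDrop_ne_lt (xs : List Char) (m : Nat) (h : xs.drop m ≠ xs) : (xs.drop m).length < xs.length := by
  have hm : m ≠ 0 := by rintro rfl; simp at h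
  have hx : xs.length ≠ 0 := by intro h0; rw [List.length_eq_zero_iff] at h0; subst h0; simp at h
  simp [List.length_drop]; omega

theorem pvSliceTo_ne_lt (xs : List Char) (b : Int) (h : PySem.List.slice xs none (some b) ≠ xs) :
    (PySem.List.slice xs none (some b)).length < xs.length := by
  have e : PySem.List.slice xs none (some b) = xs.take (PySem.List.clampIdx xs.length b) := by
    simp [PySem.List.slice, PySem.List.clampIdx]
  rw [e] at h ⊢; exact pvTake_ne_lt _ _ h

theorem pvSliceFrom_ne_lt (xs : List Char) (a : Int) (h : PySem.List.slice xs (some a) none ≠ xs) :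
    (PySem.List.slice xs (some a) none).length < xs.length := by
  rw [PySem.List.slice_some_none] at h ⊢; exact pvDrop_ne_lt _ _ h

-- A's while loop: char = "" is `none`, a one-char string is `some c`;
-- string[::-1][k] is PySem.List.pyGet? l.reverse k (s[::-1] is reverse, PySem.Str.slice?_none_none_neg_one).
def shortStringLoop (l : List Char) (k : Nat) (ch : Option Char) : Nat × Option Char :=
  if h : k < l.length ∧ ch ≠ some '.' ∧ ch ≠ some '/' then
    shortStringLoop l (k + 1) (PySem.List.pyGet? l.reverse (k : Int))
  else (k, ch)
termination_by l.length - k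
decreasing_by omega

-- A's body on the character list: strip ".suffix" (string[:-k]) or the leading
-- "…/" part (string[len-k+1:]), then recurse while the string changed.
def shortStringChars (l : List Char) : List Char :=
  let p := shortStringLoop l 0 none
  let newL :=
    if p.2 = some '.' then PySem.List.slice l none (some (-(p.1 : Int)))
    else if p.2 = some '/' then PySem.List.slice l (some ((l.length : Int) - (p.1 : Int) + 1)) none
    else l
  if h : newL ≠ l then shortStringChars newL else newL
termination_by l.length
decreasing_by
  simp only [newL, p] at h ⊢
  split at h
  · next hc =>
    simp only [hc, reduceCtorEq, reduceIte, reduceDIte]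
    exact pvSliceTo_ne_lt _ _ h
  · split at h
    · next hc hc2 =>
      simp only [hc, hc2, reduceCtorEq, reduceIte, reduceDIte]
      exact pvSliceFrom_ne_lt _ _ h
    · exact absurd rfl h

def shortString (string : String) : String := String.mk (shortStringChars string.toList)

-- ===== PORT B =====
-- one step of Source B's for-loop over (acc, seen_dot)
def shortStringStep (st : List Char × Bool) (ch : Char) : List Char × Bool :=
  if ch = '/' then ([], false)
  else if ch = '.' then (st.1, true)
  else if !st.2 then (st.1 ++ [ch], st.2)
  else st

def shortString_alt (string : String) : String :=
  String.mk (string.toList.foldl shortStringStep ([], false)).1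

-- ===== PRECONDITION & SPEC =====
def Spec_shortString (string : String) (out : String) : Prop := out = shortString_alt string
instance (string : String) (out : String) : Decidable (Spec_shortString string out) := by unfold Spec_shortString; infer_instance

-- ===== CLAIM (what is proved, stated in full; the proofs are below) =====
def Claim_equal_shortString : Prop := ∀ (string : String), Dom_shortString string → Spec_shortString string (shortString string)

-- ===== LEMMAS AND PROOFS =====

-- B's fold over a special-free run, not yet frozen: everything is appended.
theorem foldStep_plain (t : List Char) (hs : ∀ c ∈ t, c ≠ '.' ∧ c ≠ '/') (acc : List Char) :
    t.foldl shortStringStep (acc, false) = (acc ++ t, false) := by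
  induction t generalizing acc with
  | nil => simp
  | cons c t ih =>
    have hc := hs c (by simp)
    simp only [List.foldl_cons, shortStringStep, if_neg hc.2, if_neg hc.1]
    simp [ih (fun c hc => hs c (by simp [hc]))]

-- B's fold over a special-free run after a dot: the state is frozen.
theorem foldStep_frozen (t : List Char) (hs : ∀ c ∈ t, c ≠ '.' ∧ c ≠ '/') (acc : List Char) :
    t.foldl shortStringStep (acc, true) = (acc, true) := by
  induction t with
  | nil => simp
  | cons c t ih =>
    have hc := hs c (by simp)
    simp only [List.foldl_cons, shortStringStep, if_neg hc.2, if_neg hc.1]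
    simp [ih (fun c hc => hs c (by simp [hc]))]

-- A's loop on a special-free string never produces '.' or '/'.
theorem shortStringLoop_plain (l : List Char) (hs : ∀ c ∈ l, c ≠ '.' ∧ c ≠ '/') :
    ∀ (k : Nat) (ch : Option Char), ch ≠ some '.' → ch ≠ some '/' →
      (shortStringLoop l k ch).2 ≠ some '.' ∧ (shortStringLoop l k ch).2 ≠ some '/' := by
  intro k ch h1 h2
  unfold shortStringLoop
  split
  · next hg =>
    have hk : k < l.reverse.length := by simpa using hg.1
    have hmem : l.reverse[k] ∈ l := by
      have := List.getElem_mem hk; simpa using this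
    have hc := hs _ hmem
    have hget : PySem.List.pyGet? l.reverse (k : Int) = some l.reverse[k] := by
      rw [PySem.List.pyGet?_natCast]; exact List.getElem?_eq_getElem hk
    rw [hget]
    exact shortStringLoop_plain l hs (k + 1) _ (by simpa using hc.1) (by simpa using hc.2)
  · exact ⟨h1, h2⟩
termination_by k => l.length - k
decreasing_by next hg => omega

-- A's loop stops one past the first '.'/'/' of the reversed string, returning that char.
theorem shortStringLoop_find (l : List Char) (i : Nat) (hi : i < l.length)
    (hir : i < l.reverse.length)
    (hsp : l.reverse[i] = '.' ∨ l.reverse[i] = '/')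
    (hmin : ∀ j (hj : j < i), ¬ (l.reverse[j]'(by omega) = '.' ∨ l.reverse[j]'(by omega) = '/')) :
    ∀ (k : Nat) (ch : Option Char), k ≤ i → ch ≠ some '.' → ch ≠ some '/' →
      shortStringLoop l k ch = (i + 1, some (l.reverse[i])) := by
  intro k ch hk h1 h2
  rw [shortStringLoop, dif_pos ⟨by omega, h1, h2⟩]
  have hkr : k < l.reverse.length := by simpa using (by omega : k < l.length)
  rw [PySem.List.pyGet?_natCast, List.getElem?_eq_getElem hkr]
  rcases Nat.lt_or_ge k i with hlt | hge
  · have hc := hmin k hlt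
    exact shortStringLoop_find l i hi hir hsp hmin (k + 1) _ (by omega)
      (fun hcc => hc (Or.inl (Option.some.inj hcc))) (fun hcc => hc (Or.inr (Option.some.inj hcc)))
  · have hki : k = i := by omega
    subst hki
    rw [shortStringLoop, dif_neg]
    rintro ⟨-, hn1, hn2⟩
    rcases hsp with h | h
    · exact hn1 (by rw [h])
    · exact hn2 (by rw [h])
termination_by k => i + 1 - k
decreasing_by omega

-- Main lemma: A's recursive stripping equals B's single fold, by strong induction on length.
theorem shortStringChars_eq (l : List Char) :
    shortStringChars l = (l.foldl shortStringStep ([], false)).1 := by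
  by_cases hs : ∀ c ∈ l, c ≠ '.' ∧ c ≠ '/'
  · -- no '.'/'/' at all: A returns l unchanged, B appends everything
    have hp := shortStringLoop_plain l hs 0 none (by simp) (by simp)
    rw [shortStringChars]
    simp only [if_neg hp.1, if_neg hp.2, dif_neg (by simp : ¬ (l ≠ l))]
    rw [foldStep_plain l hs []]
    simp
  · -- there is a first special char at index i of the reversed string
    push Not at hs
    obtain ⟨x, hxmem, hx⟩ := hs
    have hxr : x ∈ l.reverse := by simpa using hxmem
    set p : Char → Bool := fun c => c = '.' ∨ c = '/' with hpdef
    have hpx : p x = true := by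
      by_cases h : x = '.'
      · simp [hpdef, h]
      · simp [hpdef, hx h]
    set i := l.reverse.findIdx p with hidef
    have hir : i < l.reverse.length := List.findIdx_lt_length.mpr ⟨x, hxr, hpx⟩
    have hi : i < l.length := by simpa using hir
    have hspb : p l.reverse[i] = true := List.findIdx_getElem
    have hsp : l.reverse[i] = '.' ∨ l.reverse[i] = '/' := by simpa [hpdef] using hspb
    have hmin : ∀ j (hj : j < i), ¬ (l.reverse[j]'(by omega) = '.' ∨ l.reverse[j]'(by omega) = '/') := by
      intro j hj
      have := List.not_of_lt_findIdx (p := p) (xs := l.reverse) hj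
      simpa [hpdef] using this
    have hloop := shortStringLoop_find l i hi hir hsp hmin 0 none (by omega) (by simp) (by simp)
    -- decompose l around the last special char: l = l₁ ++ c :: t with t special-free
    have hrev : l.reverse[i] = l[l.length - 1 - i]'(by omega) :=
      List.getElem_reverse hir
    have hdec : l.take (l.length - 1 - i) ++ l.reverse[i] :: l.drop (l.length - i) = l := by
      rw [hrev]
      have h1 : (l[l.length - 1 - i]'(by omega)) :: l.drop (l.length - 1 - i + 1)
          = l.drop (l.length - 1 - i) := List.getElem_cons_drop (by omega)
      have h2 : l.length - 1 - i + 1 = l.length - i := by omega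
      rw [h2] at h1
      rw [h1, List.take_append_drop]
    have htfree : ∀ c ∈ l.drop (l.length - i), c ≠ '.' ∧ c ≠ '/' := by
      intro c hc
      rw [List.mem_iff_getElem] at hc
      obtain ⟨j, hj, rfl⟩ := hc
      have hjd : (l.drop (l.length - i))[j] = l[l.length - i + j]'(by
        have := List.length_drop (l := l) (i := l.length - i); omega) := List.getElem_drop
      have hjr : l[l.length - i + j]'(by have := List.length_drop (l := l) (i := l.length - i); omega)
          = l.reverse[l.length - 1 - (l.length - i + j)]'(by
              have := List.length_drop (l := l) (i := l.length - i); simp; omega) := by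
        rw [List.getElem_reverse]; congr 1
        have := List.length_drop (l := l) (i := l.length - i); omega
      have hlt : l.length - 1 - (l.length - i + j) < i := by
        have := List.length_drop (l := l) (i := l.length - i); omega
      have hnot := hmin _ hlt
      rw [hjd, hjr]
      exact ⟨fun h => hnot (Or.inl h), fun h => hnot (Or.inr h)⟩
    rw [shortStringChars]
    simp only [hloop]
    rcases hsp with hdot | hslash
    · -- strip the ".suffix": newL = l[:-(i+1)] = take (len-1-i) l
      have hfold : (l.foldl shortStringStep ([], false)).1
          = ((l.take (l.length - 1 - i)).foldl shortStringStep ([], false)).1 := by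
        conv_lhs => rw [← hdec]
        rw [List.foldl_append, List.foldl_cons, hdot]
        set st := (l.take (l.length - 1 - i)).foldl shortStringStep ([], false) with hst
        have hstep : shortStringStep st '.' = (st.1, true) := by simp [shortStringStep]
        rw [hstep, foldStep_frozen _ htfree]
      have hslice : PySem.List.slice l none (some (-((i + 1 : Nat) : Int)))
          = l.take (l.length - (i + 1)) := PySem.List.slice_to_neg_natCast l (i + 1) (by omega)
      have hlen1 : (l.take (l.length - (i + 1))).length = l.length - (i + 1) := by
        rw [List.length_take]; omega
      have hne : l.take (l.length - (i + 1)) ≠ l := by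
        intro h
        have := congrArg List.length h
        rw [hlen1] at this; omega
      simp only [hdot, reduceCtorEq, reduceIte]
      rw [hslice, dif_pos hne]
      rw [shortStringChars_eq (l.take (l.length - (i + 1)))]
      have hidx : l.length - (i + 1) = l.length - 1 - i := by omega
      rw [hfold, hidx]
    · -- take the part after the last '/': newL = l[len-(i+1)+1:] = drop (len-i) l
      have hslice : PySem.List.slice l (some ((l.length : Int) - ((i + 1 : Nat) : Int) + 1)) none
          = l.drop (l.length - i) := by
        have hanat : ((l.length : Int) - ((i + 1 : Nat) : Int) + 1) = ((l.length - i : Nat) : Int) := by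
          push_cast; omega
        rw [hanat, PySem.List.slice_from_natCast]
      have hlen2 : (l.drop (l.length - i)).length = i := by
        rw [List.length_drop]; omega
      have hne : l.drop (l.length - i) ≠ l := by
        intro h
        have := congrArg List.length h
        rw [hlen2] at this; omega
      simp only [hslash]
      rw [if_neg (show (some '/' : Option Char) ≠ some '.' by decide)]
      simp only [if_true]
      rw [hslice, dif_pos hne]
      rw [shortStringChars_eq (l.drop (l.length - i))]
      conv_rhs => rw [← hdec]
      rw [List.foldl_append, List.foldl_cons, hslash]
      have hstep : shortStringStep ((l.take (l.length - 1 - i)).foldl shortStringStep ([], false)) '/'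
          = ([], false) := by simp [shortStringStep]
      rw [hstep]
termination_by l.length
decreasing_by
  all_goals first | rw [List.length_take] | rw [List.length_drop]
  all_goals (have hfi : List.findIdx (fun c => decide (c = '.' ∨ c = '/')) l.reverse < l.length := hi; omega)

-- ===== VERDICT (by name: the statement is the Claim_ definition above) =====
theorem shortString_spec : Claim_equal_shortString := by
  intro s _
  unfold Spec_shortString shortString shortString_alt
  rw [shortStringChars_eq]
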